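-- pv_equiv track=rewrite | github.com/Alex-Sheardown/Recipe_Scraper | Recipe Project/Database and Cleaning/Table_Organizer/Ingredient_processing/initial_check.py | create_seperation
-- ===== SOURCE A (Python) =====
-- def create_seperation(measurement, info):
--     positive_test_case = []
--     false_test_case = []
--     portion_case = []
--     name = ""
--     for i in info:
--
--         if i[0] == measurement:
--
--             name =  i[1]
--             positive_test_case += i[2]
--             portion_case += i[3]
--         else:
--             false_test_case += i[2]
--
--
--     return name, positive_test_case, false_test_case, portion_case
-- ===== SOURCE B (Python) =====
-- def create_seperation(measurement, info):
--     matched = [i for i in info if i[0] == measurement]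
--     unmatched = [i for i in info if i[0] != measurement]
--     name = matched[-1][1] if matched else ""
--     positive_test_case = [x for i in matched for x in i[2]]
--     portion_case = [x for i in matched for x in i[3]]
--     false_test_case = [x for i in unmatched for x in i[2]]
--     return name, positive_test_case, false_test_case, portion_case
-- ===== Notes on version B (the rewrite author's own statement) =====
-- stated objective: simpler
-- what changed: Replaces A's single fused loop mutating four accumulators with a filter-then-aggregate decomposition: partition rows by the measurement match once, take the name from the last matched row, and build each output list as a flat concatenation over the relevant partition.
import Mathlib
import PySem

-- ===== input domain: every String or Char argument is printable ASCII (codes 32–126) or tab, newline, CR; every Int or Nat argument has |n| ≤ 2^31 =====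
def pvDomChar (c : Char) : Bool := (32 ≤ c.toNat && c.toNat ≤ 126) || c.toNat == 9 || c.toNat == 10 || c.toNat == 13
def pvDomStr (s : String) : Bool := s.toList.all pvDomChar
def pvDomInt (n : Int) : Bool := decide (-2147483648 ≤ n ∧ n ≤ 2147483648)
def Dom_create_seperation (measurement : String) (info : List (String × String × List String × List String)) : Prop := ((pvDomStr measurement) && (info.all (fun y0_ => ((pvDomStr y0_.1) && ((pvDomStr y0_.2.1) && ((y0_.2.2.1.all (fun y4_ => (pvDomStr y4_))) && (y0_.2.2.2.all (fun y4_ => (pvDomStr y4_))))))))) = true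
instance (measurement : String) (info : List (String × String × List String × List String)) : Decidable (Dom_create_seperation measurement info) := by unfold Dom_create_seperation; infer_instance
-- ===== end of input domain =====

-- ===== PORT A =====
-- one fused pass over info maintaining (name, positive, false, portion), as in A
def create_seperation (measurement : String) (info : List (String × String × List String × List String)) : String × List String × List String × List String :=
  info.foldl
    (fun s i =>
      if i.1 == measurement then
        (i.2.1, s.2.1 ++ i.2.2.1, s.2.2.1, s.2.2.2 ++ i.2.2.2)
      else
        (s.1, s.2.1, s.2.2.1 ++ i.2.2.1, s.2.2.2))
    ("", [], [], [])

-- ===== PORT B =====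
-- B: filter-then-aggregate (partition rows, name from last matched row, flat concatenations)
def create_seperation_alt (measurement : String) (info : List (String × String × List String × List String)) : String × List String × List String × List String :=
  let matched := info.filter (fun i => i.1 == measurement)
  let unmatched := info.filter (fun i => !(i.1 == measurement))
  let name := match matched.getLast? with
    | some i => i.2.1
    | none => ""
  let positive_test_case := matched.flatMap (fun i => i.2.2.1)
  let portion_case := matched.flatMap (fun i => i.2.2.2)
  let false_test_case := unmatched.flatMap (fun i => i.2.2.1)
  (name, positive_test_case, false_test_case, portion_case)

-- ===== PRECONDITION & SPEC =====
def Spec_create_seperation (measurement : String) (info : List (String × String × List String × List String)) (out : String × List String × List String × List String) : Prop := out = create_seperation_alt measurement info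
instance (measurement : String) (info : List (String × String × List String × List String)) (out : String × List String × List String × List String) : Decidable (Spec_create_seperation measurement info out) := by unfold Spec_create_seperation; infer_instance

-- ===== CLAIM (what is proved, stated in full; the proofs are below) =====
def Claim_equal_create_seperation : Prop := ∀ (measurement : String) (info : List (String × String × List String × List String)), Dom_create_seperation measurement info → Spec_create_seperation measurement info (create_seperation measurement info)

-- ===== LEMMAS AND PROOFS =====

-- ===== VERDICT (by name: the statement is the Claim_ definition above) =====
-- loop invariant: the fold from an arbitrary state is the filtered aggregates appended to it
theorem createSep_fold_eq (measurement : String)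
    (info : List (String × String × List String × List String))
    (s : String × List String × List String × List String) :
    info.foldl
      (fun s i =>
        if i.1 == measurement then
          (i.2.1, s.2.1 ++ i.2.2.1, s.2.2.1, s.2.2.2 ++ i.2.2.2)
        else
          (s.1, s.2.1, s.2.2.1 ++ i.2.2.1, s.2.2.2))
      s
    = ((match (info.filter (fun i => i.1 == measurement)).getLast? with
        | some i => i.2.1
        | none => s.1),
       s.2.1 ++ (info.filter (fun i => i.1 == measurement)).flatMap (fun i => i.2.2.1),
       s.2.2.1 ++ (info.filter (fun i => !(i.1 == measurement))).flatMap (fun i => i.2.2.1),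
       s.2.2.2 ++ (info.filter (fun i => i.1 == measurement)).flatMap (fun i => i.2.2.2)) := by
  induction info generalizing s with
  | nil => simp
  | cons a t ih =>
    by_cases h : a.1 == measurement
    · simp only [List.foldl_cons, List.filter_cons, h, if_pos h, ite_true, cond_true]
      rw [ih]
      cases hl : (t.filter (fun i => i.1 == measurement)).getLast? with
      | none => simp [List.getLast?_cons, hl, List.append_assoc, List.getLastD]
      | some x => simp [List.getLast?_cons, hl, List.append_assoc, List.getLastD]
    · simp only [List.foldl_cons, List.filter_cons, h, if_neg h, Bool.not_eq_true']
      rw [ih]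
      simp [List.append_assoc]

theorem create_seperation_spec : Claim_equal_create_seperation := by
  intro measurement info _
  unfold Spec_create_seperation create_seperation create_seperation_alt
  rw [createSep_fold_eq]
  simp
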